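-- pv_equiv track=rewrite | github.com/Isabelle237/ethicalpulse | EthicalpulsApp/utils/run_aircrack_scan.py | parse_aircrack_output
-- ===== SOURCE A (Python) =====
-- def parse_aircrack_output(output, option):
--     """Parse la sortie d'Aircrack-ng"""
--     parsed = {
--         "networks": [],
--         "clients": [],
--         "captured_handshakes": [],
--         "cracked_passwords": [],
--         "errors": []
--     }
--
--     for line in output.splitlines():
--         line = line.strip()
--         if not line:
--             continue
--
--         if 'handshake' in line.lower():
--             parsed["captured_handshakes"].append(line)
--         elif 'key found' in line.lower():
--             parsed["cracked_passwords"].append(line)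
--         elif 'bssid' in line.lower() and 'channel' in line.lower():
--             parsed["networks"].append(line)
--         elif 'station' in line.lower():
--             parsed["clients"].append(line)
--         elif any(err in line.lower() for err in ['failed', 'error', 'warning']):
--             parsed["errors"].append(line)
--
--     return parsed
-- ===== SOURCE B (Python) =====
-- def parse_aircrack_output(output, option):
--     """Parse la sortie d'Aircrack-ng"""
--     def bucket(line):
--         low = line.lower()
--         if 'handshake' in low:
--             return "captured_handshakes"
--         if 'key found' in low:
--             return "cracked_passwords"
--         if 'bssid' in low and 'channel' in low:
--             return "networks"
--         if 'station' in low: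
--             return "clients"
--         if 'failed' in low or 'error' in low or 'warning' in low:
--             return "errors"
--         return None
--
--     lines = [s for s in map(str.strip, output.splitlines()) if s]
--     return {key: [l for l in lines if bucket(l) == key]
--             for key in ("networks", "clients", "captured_handshakes",
--                         "cracked_passwords", "errors")}
-- ===== Notes on version B (the rewrite author's own statement) =====
-- stated objective: idiomatic
-- what changed: A dispatches each line through an if/elif chain that mutates a shared dict in place; B defines a pure classify function returning the bucket key and builds the result in one dict comprehension with a filter per bucket over the pre-cleaned line list.
import Mathlib
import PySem

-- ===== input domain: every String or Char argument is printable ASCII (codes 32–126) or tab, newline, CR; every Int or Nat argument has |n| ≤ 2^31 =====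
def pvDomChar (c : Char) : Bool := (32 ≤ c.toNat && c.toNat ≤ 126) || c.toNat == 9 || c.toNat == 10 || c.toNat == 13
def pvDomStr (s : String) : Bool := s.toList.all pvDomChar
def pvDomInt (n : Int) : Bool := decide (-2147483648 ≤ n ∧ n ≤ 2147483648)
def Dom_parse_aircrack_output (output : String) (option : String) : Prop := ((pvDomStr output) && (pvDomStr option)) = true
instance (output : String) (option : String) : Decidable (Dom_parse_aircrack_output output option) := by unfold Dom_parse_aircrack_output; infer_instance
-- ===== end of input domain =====

-- B replaces A's per-line dispatch into a mutated dict by a classify function plus one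
-- filter comprehension per bucket (objective: idiomatic); same return value, no mutation involved.

-- ===== PORT A =====
-- one iteration of A's for-loop (strip, skip empty, elif chain appending into the dict)
def pvAStep (d : PySem.Dict String (List String)) (raw : String) : PySem.Dict String (List String) :=
  let line := PySem.Str.strip raw
  if line = "" then d
  else if PySem.Str.isIn "handshake" (PySem.Str.lower line) then
    d.modify "captured_handshakes" [] (· ++ [line])
  else if PySem.Str.isIn "key found" (PySem.Str.lower line) then
    d.modify "cracked_passwords" [] (· ++ [line])
  else if PySem.Str.isIn "bssid" (PySem.Str.lower line) && PySem.Str.isIn "channel" (PySem.Str.lower line) then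
    d.modify "networks" [] (· ++ [line])
  else if PySem.Str.isIn "station" (PySem.Str.lower line) then
    d.modify "clients" [] (· ++ [line])
  else if ["failed", "error", "warning"].any (fun err => PySem.Str.isIn err (PySem.Str.lower line)) then
    d.modify "errors" [] (· ++ [line])
  else d

def parse_aircrack_output (output : String) (option : String) : List (String × List String) :=
  let parsed : PySem.Dict String (List String) :=
    PySem.Dict.ofList
      [("networks", []), ("clients", []), ("captured_handshakes", []),
       ("cracked_passwords", []), ("errors", [])]
  ((PySem.Str.splitlines output).foldl pvAStep parsed).items

-- ===== PORT B =====
-- B's classify helper: the bucket key of a (stripped, nonempty) line, or none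
def pvBucket (line : String) : Option String :=
  let low := PySem.Str.lower line
  if PySem.Str.isIn "handshake" low then some "captured_handshakes"
  else if PySem.Str.isIn "key found" low then some "cracked_passwords"
  else if PySem.Str.isIn "bssid" low && PySem.Str.isIn "channel" low then some "networks"
  else if PySem.Str.isIn "station" low then some "clients"
  else if PySem.Str.isIn "failed" low || PySem.Str.isIn "error" low || PySem.Str.isIn "warning" low then some "errors"
  else none

def parse_aircrack_output_alt (output : String) (option : String) : List (String × List String) :=
  let lines := ((PySem.Str.splitlines output).map PySem.Str.strip).filter (fun s => s != "")
  ["networks", "clients", "captured_handshakes", "cracked_passwords", "errors"].map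
    (fun key => (key, lines.filter (fun l => pvBucket l == some key)))

-- ===== PRECONDITION & SPEC =====
def Spec_parse_aircrack_output (output : String) (option : String) (out : List (String × List String)) : Prop := out = parse_aircrack_output_alt output option
instance (output : String) (option : String) (out : List (String × List String)) : Decidable (Spec_parse_aircrack_output output option out) := by unfold Spec_parse_aircrack_output; infer_instance

-- ===== CLAIM (what is proved, stated in full; the proofs are below) =====
def Claim_equal_parse_aircrack_output : Prop := ∀ (output : String) (option : String), Dom_parse_aircrack_output output option → Spec_parse_aircrack_output output option (parse_aircrack_output output option)

-- ===== LEMMAS AND PROOFS =====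

-- the stripped nonempty lines B builds first
def pvClean (ls : List String) : List String :=
  (ls.map PySem.Str.strip).filter (fun s => s != "")

-- loop invariant: folding A's step over raw lines, starting from the five buckets with
-- accumulated contents a..e, appends to each bucket exactly B's filter of the cleaned lines
theorem pv_inv (ls : List String) (a b c d e : List String) :
    (ls.foldl pvAStep
      ⟨[("networks", a), ("clients", b), ("captured_handshakes", c),
        ("cracked_passwords", d), ("errors", e)]⟩).items
    = [("networks", a ++ (pvClean ls).filter (fun l => pvBucket l == some "networks")),
       ("clients", b ++ (pvClean ls).filter (fun l => pvBucket l == some "clients")),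
       ("captured_handshakes", c ++ (pvClean ls).filter (fun l => pvBucket l == some "captured_handshakes")),
       ("cracked_passwords", d ++ (pvClean ls).filter (fun l => pvBucket l == some "cracked_passwords")),
       ("errors", e ++ (pvClean ls).filter (fun l => pvBucket l == some "errors"))] := by
  induction ls generalizing a b c d e with
  | nil => simp [pvClean, PySem.Dict.items]
  | cons l ls ih =>
    by_cases h0 : PySem.Str.strip l = ""
    · simpa [pvClean, pvAStep, h0] using ih a b c d e
    · by_cases hH : PySem.Chars.isIn ['h', 'a', 'n', 'd', 's', 'h', 'a', 'k', 'e'] (PySem.Chars.lower (PySem.Chars.strip l.toList)) = true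
      · simp [pvClean, pvAStep, pvBucket, h0, hH, PySem.Dict.modify, PySem.Dict.insert,
              PySem.Dict.getD, PySem.Dict.get?, PySem.Dict.contains, ih]
      · by_cases hK : PySem.Chars.isIn ['k', 'e', 'y', ' ', 'f', 'o', 'u', 'n', 'd'] (PySem.Chars.lower (PySem.Chars.strip l.toList)) = true
        · simp [pvClean, pvAStep, pvBucket, h0, hH, hK, PySem.Dict.modify, PySem.Dict.insert,
                PySem.Dict.getD, PySem.Dict.get?, PySem.Dict.contains, ih]
        · by_cases hB : PySem.Chars.isIn ['b', 's', 's', 'i', 'd'] (PySem.Chars.lower (PySem.Chars.strip l.toList)) = true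
          · by_cases hC : PySem.Chars.isIn ['c', 'h', 'a', 'n', 'n', 'e', 'l'] (PySem.Chars.lower (PySem.Chars.strip l.toList)) = true
            · simp [pvClean, pvAStep, pvBucket, h0, hH, hK, hB, hC, PySem.Dict.modify, PySem.Dict.insert,
                    PySem.Dict.getD, PySem.Dict.get?, PySem.Dict.contains, ih]
            · by_cases hS : PySem.Chars.isIn ['s', 't', 'a', 't', 'i', 'o', 'n'] (PySem.Chars.lower (PySem.Chars.strip l.toList)) = true
              · simp [pvClean, pvAStep, pvBucket, h0, hH, hK, hB, hC, hS, PySem.Dict.modify, PySem.Dict.insert,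
                      PySem.Dict.getD, PySem.Dict.get?, PySem.Dict.contains, ih]
              · by_cases hF : PySem.Chars.isIn ['f', 'a', 'i', 'l', 'e', 'd'] (PySem.Chars.lower (PySem.Chars.strip l.toList)) = true
                · simp [pvClean, pvAStep, pvBucket, h0, hH, hK, hB, hC, hS, hF, PySem.Dict.modify, PySem.Dict.insert,
                        PySem.Dict.getD, PySem.Dict.get?, PySem.Dict.contains, ih]
                · by_cases hE : PySem.Chars.isIn ['e', 'r', 'r', 'o', 'r'] (PySem.Chars.lower (PySem.Chars.strip l.toList)) = true
                  · simp [pvClean, pvAStep, pvBucket, h0, hH, hK, hB, hC, hS, hF, hE, PySem.Dict.modify, PySem.Dict.insert,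
                          PySem.Dict.getD, PySem.Dict.get?, PySem.Dict.contains, ih]
                  · by_cases hW : PySem.Chars.isIn ['w', 'a', 'r', 'n', 'i', 'n', 'g'] (PySem.Chars.lower (PySem.Chars.strip l.toList)) = true
                    · simp [pvClean, pvAStep, pvBucket, h0, hH, hK, hB, hC, hS, hF, hE, hW, PySem.Dict.modify, PySem.Dict.insert,
                            PySem.Dict.getD, PySem.Dict.get?, PySem.Dict.contains, ih]
                    · simp [pvClean, pvAStep, pvBucket, h0, hH, hK, hB, hC, hS, hF, hE, hW, PySem.Dict.modify, PySem.Dict.insert,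
                            PySem.Dict.getD, PySem.Dict.get?, PySem.Dict.contains, ih]
          · by_cases hS : PySem.Chars.isIn ['s', 't', 'a', 't', 'i', 'o', 'n'] (PySem.Chars.lower (PySem.Chars.strip l.toList)) = true
            · simp [pvClean, pvAStep, pvBucket, h0, hH, hK, hB, hS, PySem.Dict.modify, PySem.Dict.insert,
                    PySem.Dict.getD, PySem.Dict.get?, PySem.Dict.contains, ih]
            · by_cases hF : PySem.Chars.isIn ['f', 'a', 'i', 'l', 'e', 'd'] (PySem.Chars.lower (PySem.Chars.strip l.toList)) = true
              · simp [pvClean, pvAStep, pvBucket, h0, hH, hK, hB, hS, hF, PySem.Dict.modify, PySem.Dict.insert,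
                      PySem.Dict.getD, PySem.Dict.get?, PySem.Dict.contains, ih]
              · by_cases hE : PySem.Chars.isIn ['e', 'r', 'r', 'o', 'r'] (PySem.Chars.lower (PySem.Chars.strip l.toList)) = true
                · simp [pvClean, pvAStep, pvBucket, h0, hH, hK, hB, hS, hF, hE, PySem.Dict.modify, PySem.Dict.insert,
                        PySem.Dict.getD, PySem.Dict.get?, PySem.Dict.contains, ih]
                · by_cases hW : PySem.Chars.isIn ['w', 'a', 'r', 'n', 'i', 'n', 'g'] (PySem.Chars.lower (PySem.Chars.strip l.toList)) = true
                  · simp [pvClean, pvAStep, pvBucket, h0, hH, hK, hB, hS, hF, hE, hW, PySem.Dict.modify, PySem.Dict.insert,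
                          PySem.Dict.getD, PySem.Dict.get?, PySem.Dict.contains, ih]
                  · simp [pvClean, pvAStep, pvBucket, h0, hH, hK, hB, hS, hF, hE, hW, PySem.Dict.modify, PySem.Dict.insert,
                          PySem.Dict.getD, PySem.Dict.get?, PySem.Dict.contains, ih]

-- ===== VERDICT (by name: the statement is the Claim_ definition above) =====
theorem parse_aircrack_output_spec : Claim_equal_parse_aircrack_output := by
  intro output option _
  unfold Spec_parse_aircrack_output parse_aircrack_output parse_aircrack_output_alt
  have h := pv_inv (PySem.Str.splitlines output) [] [] [] [] []
  simpa [pvClean, PySem.Dict.ofList] using h
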